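-- pv_equiv track=rewrite | github.com/hbhavsar1002/Chess-AI | Time Limited Iterative Deepening Minimax with Alpha Beta Pruning/Joueur.py/games/chess/ai.py | heuristic_fucntion
-- ===== SOURCE A (Python) =====
-- def heuristic_fucntion(board):
--
--     heu_val = 0
--
--     for i, line in enumerate(board):
--         for j,k in enumerate(line):
--             try:
--                 if k == 'P' or k == 'p':
--                     if k.isupper():
--                         heu_val += 1
--                     else:
--                         heu_val -= 1
--
--                 if k == 'K' or k == 'k':
--                     if k.isupper():
--                         heu_val += 90
--                     else:
--                         heu_val -= 90
--
--                 if k == 'Q' or k == 'q':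
--                     if k.isupper():
--                         heu_val += 9
--                     else:
--                         heu_val -= 9
--
--                 if k == 'N' or k == 'n' or k == 'B' or k == 'b':
--                     if k.isupper():
--                         heu_val += 3
--                     else:
--                         heu_val -= 3
--
--                 if k == 'R' or k == 'r':
--                     if k.isupper():
--                         heu_val += 5
--                     else:
--                         heu_val -= 5
--
--             except ValueError:
--                 continue
--
--     return heu_val
-- ===== SOURCE B (Python) =====
-- PIECE_VALUES = (('P', 1), ('p', -1), ('K', 90), ('k', -90), ('Q', 9), ('q', -9),
--                 ('N', 3), ('n', -3), ('B', 3), ('b', -3), ('R', 5), ('r', -5))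
--
-- def heuristic_fucntion(board):
--     flat = [k for line in board for k in line]
--     return sum(v * flat.count(p) for p, v in PIECE_VALUES)
-- ===== Notes on version B (the rewrite author's own statement) =====
-- stated objective: idiomatic
-- what changed: Instead of A's single cell-major scan with a chain of equality branches per cell, B flattens the board once and makes twelve piece-major passes, one list.count per piece letter, multiplying each count by its weight (the dead try/except is dropped).
import Mathlib
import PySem

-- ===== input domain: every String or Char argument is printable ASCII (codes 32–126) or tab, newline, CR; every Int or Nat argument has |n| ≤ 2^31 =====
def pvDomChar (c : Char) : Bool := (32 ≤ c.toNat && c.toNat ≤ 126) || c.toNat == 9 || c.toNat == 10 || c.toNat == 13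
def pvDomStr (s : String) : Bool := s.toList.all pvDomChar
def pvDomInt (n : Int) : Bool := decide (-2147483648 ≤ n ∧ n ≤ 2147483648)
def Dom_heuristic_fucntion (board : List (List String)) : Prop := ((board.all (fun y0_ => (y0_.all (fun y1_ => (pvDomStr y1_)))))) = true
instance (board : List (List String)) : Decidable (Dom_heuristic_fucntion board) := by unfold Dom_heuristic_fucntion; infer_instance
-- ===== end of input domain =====

-- B replaces A's cell-major scan with per-cell branching by twelve piece-major passes: flatten once, then one count per piece letter, weighted (objective: idiomatic; same asymptotic cost).

-- ===== PORT A =====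
-- str.isupper(): at least one uppercase letter and no lowercase letter — exact on the ASCII domain
def pvStrIsupper (s : String) : Bool :=
  s.toList.any PySem.Chars.isupper && !(s.toList.any PySem.Chars.islower)

-- one iteration of A's inner loop body (the try/except is dead: nothing inside raises ValueError)
def pvStepA (heu_val : Int) (k : String) : Int :=
  let h1 := if k = "P" ∨ k = "p" then (if pvStrIsupper k then heu_val + 1 else heu_val - 1) else heu_val
  let h2 := if k = "K" ∨ k = "k" then (if pvStrIsupper k then h1 + 90 else h1 - 90) else h1
  let h3 := if k = "Q" ∨ k = "q" then (if pvStrIsupper k then h2 + 9 else h2 - 9) else h2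
  let h4 := if k = "N" ∨ k = "n" ∨ k = "B" ∨ k = "b" then (if pvStrIsupper k then h3 + 3 else h3 - 3) else h3
  if k = "R" ∨ k = "r" then (if pvStrIsupper k then h4 + 5 else h4 - 5) else h4

def heuristic_fucntion (board : List (List String)) : Int :=
  (PySem.List.enumerate board 0).foldl (fun heu_val il =>
    (PySem.List.enumerate il.2 0).foldl (fun h jk => pvStepA h jk.2) heu_val) 0

-- ===== PORT B =====
def pvPieceValues : List (String × Int) :=
  [("P",1),("p",-1),("K",90),("k",-90),("Q",9),("q",-9),("N",3),("n",-3),("B",3),("b",-3),("R",5),("r",-5)]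

def heuristic_fucntion_alt (board : List (List String)) : Int :=
  let flat := board.flatMap (fun line => line)
  pvPieceValues.foldl (fun acc pv => acc + pv.2 * (PySem.List.count flat pv.1 : Int)) 0

-- ===== PRECONDITION & SPEC =====
def Spec_heuristic_fucntion (board : List (List String)) (out : Int) : Prop := out = heuristic_fucntion_alt board
instance (board : List (List String)) (out : Int) : Decidable (Spec_heuristic_fucntion board out) := by unfold Spec_heuristic_fucntion; infer_instance

-- ===== CLAIM (what is proved, stated in full; the proofs are below) =====
def Claim_equal_heuristic_fucntion : Prop := ∀ (board : List (List String)), Dom_heuristic_fucntion board → Spec_heuristic_fucntion board (heuristic_fucntion board)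

-- ===== LEMMAS AND PROOFS =====

-- per-line count of a piece, summed over the board, as an Int
def pvC (board : List (List String)) (p : String) : Int :=
  (board.map (fun l => (l.count p : Int))).sum

theorem pvStepA_shift (h : Int) (k : String) : pvStepA h k = h + pvStepA 0 k := by
  simp only [pvStepA]
  split_ifs <;> ring

theorem pvStepA_val (k : String) :
    pvStepA 0 k = (pvPieceValues.map (fun pv => pv.2 * (if pv.1 = k then 1 else 0))).sum := by
  by_cases h1 : k = "P"; · subst h1; decide
  by_cases h2 : k = "p"; · subst h2; decide
  by_cases h3 : k = "K"; · subst h3; decide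
  by_cases h4 : k = "k"; · subst h4; decide
  by_cases h5 : k = "Q"; · subst h5; decide
  by_cases h6 : k = "q"; · subst h6; decide
  by_cases h7 : k = "N"; · subst h7; decide
  by_cases h8 : k = "n"; · subst h8; decide
  by_cases h9 : k = "B"; · subst h9; decide
  by_cases h10 : k = "b"; · subst h10; decide
  by_cases h11 : k = "R"; · subst h11; decide
  by_cases h12 : k = "r"; · subst h12; decide
  simp [pvStepA, pvPieceValues, h1, h2, h3, h4, h5, h6, h7, h8, h9, h10, h11, h12,
        Ne.symm h1, Ne.symm h2, Ne.symm h3, Ne.symm h4, Ne.symm h5, Ne.symm h6,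
        Ne.symm h7, Ne.symm h8, Ne.symm h9, Ne.symm h10, Ne.symm h11, Ne.symm h12]

theorem pv_weight_add (l : List (String × Int)) (c1 c2 : String → Int) :
    (l.map (fun pv => pv.2 * (c1 pv.1 + c2 pv.1))).sum
      = (l.map (fun pv => pv.2 * c1 pv.1)).sum + (l.map (fun pv => pv.2 * c2 pv.1)).sum := by
  induction l with
  | nil => simp
  | cons x xs ih => simp [ih]; ring

theorem pv_line_sum (line : List String) :
    (line.map (pvStepA 0)).sum
      = (pvPieceValues.map (fun pv => pv.2 * (line.count pv.1 : Int))).sum := by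
  induction line with
  | nil => simp
  | cons k rest ih =>
      have hc : ∀ pv : String × Int,
          (((k :: rest).count pv.1 : Int)) = (if pv.1 = k then 1 else 0) + (rest.count pv.1 : Int) := by
        intro pv
        rcases eq_or_ne pv.1 k with h | h
        · simp [h]; omega
        · simp [h, Ne.symm h]
      calc ((k :: rest).map (pvStepA 0)).sum
          = pvStepA 0 k + (rest.map (pvStepA 0)).sum := by simp
        _ = (pvPieceValues.map (fun pv => pv.2 * (if pv.1 = k then 1 else 0))).sum
              + (pvPieceValues.map (fun pv => pv.2 * (rest.count pv.1 : Int))).sum := by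
              rw [pvStepA_val, ih]
        _ = (pvPieceValues.map (fun pv => pv.2 * ((k :: rest).count pv.1 : Int))).sum := by
              conv_rhs => rw [show (pvPieceValues.map (fun pv => pv.2 * ((k :: rest).count pv.1 : Int)))
                = pvPieceValues.map (fun pv => pv.2 * ((if pv.1 = k then 1 else 0) + (rest.count pv.1 : Int))) from
                List.map_congr_left (fun pv _ => by rw [hc pv])]
              exact (pv_weight_add pvPieceValues (fun s => if s = k then 1 else 0)
                (fun s => (rest.count s : Int))).symm

theorem pvA_line (heu_val : Int) (line : List String) :
    (PySem.List.enumerate line 0).foldl (fun h jk => pvStepA h jk.2) heu_val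
      = heu_val + (line.map (pvStepA 0)).sum := by
  have hfun : (fun (h : Int) (jk : Int × String) => pvStepA h jk.2)
      = (fun h jk => h + pvStepA 0 jk.2) := by
    funext h jk; exact pvStepA_shift h jk.2
  have hmap : ((PySem.List.enumerate line 0).map (fun jk : Int × String => pvStepA 0 jk.2))
      = line.map (pvStepA 0) := by
    calc ((PySem.List.enumerate line 0).map (fun jk : Int × String => pvStepA 0 jk.2))
        = ((PySem.List.enumerate line 0).map (·.2)).map (pvStepA 0) := by
          rw [List.map_map]; rfl
      _ = line.map (pvStepA 0) := by rw [PySem.List.map_snd_enumerate]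
  rw [hfun, PySem.List.foldl_add _ (fun jk : Int × String => pvStepA 0 jk.2) heu_val, hmap]

theorem pvA_eq_sum (board : List (List String)) :
    heuristic_fucntion board = (board.map (fun line => (line.map (pvStepA 0)).sum)).sum := by
  unfold heuristic_fucntion
  have hfun : (fun (heu_val : Int) (il : Int × List String) =>
        (PySem.List.enumerate il.2 0).foldl (fun h jk => pvStepA h jk.2) heu_val)
      = (fun heu_val il => heu_val + ((il.2.map (pvStepA 0)).sum)) := by
    funext heu_val il; exact pvA_line heu_val il.2
  have hmap : ((PySem.List.enumerate board 0).map
        (fun il : Int × List String => (il.2.map (pvStepA 0)).sum))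
      = board.map (fun line => (line.map (pvStepA 0)).sum) := by
    calc ((PySem.List.enumerate board 0).map
          (fun il : Int × List String => (il.2.map (pvStepA 0)).sum))
        = ((PySem.List.enumerate board 0).map (·.2)).map (fun line => (line.map (pvStepA 0)).sum) := by
          rw [List.map_map]; rfl
      _ = board.map (fun line => (line.map (pvStepA 0)).sum) := by rw [PySem.List.map_snd_enumerate]
  rw [hfun, PySem.List.foldl_add _ (fun il : Int × List String => (il.2.map (pvStepA 0)).sum) 0, hmap]
  omega

-- counting a piece in the flattened board = summing its per-line counts
theorem pvCount_flat (board : List (List String)) (p : String) :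
    ((board.flatMap (fun line => line)).count p : Int) = pvC board p := by
  induction board with
  | nil => simp [pvC]
  | cons line rest ih =>
      simp only [List.flatMap_cons, List.count_append, pvC, List.map_cons, List.sum_cons]
      push_cast
      simp only [pvC] at ih
      rw [ih]

theorem pvB_eq_sum (board : List (List String)) :
    heuristic_fucntion_alt board = (pvPieceValues.map (fun pv => pv.2 * pvC board pv.1)).sum := by
  unfold heuristic_fucntion_alt
  rw [PySem.List.foldl_add]
  rw [List.map_congr_left (fun pv _ => by
    rw [show ((PySem.List.count (board.flatMap (fun line => line)) pv.1 : Int)) = pvC board pv.1 from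
      by rw [PySem.List.count_eq]; exact pvCount_flat board pv.1])]
  omega

theorem pv_board_sum (board : List (List String)) :
    (board.map (fun line => (line.map (pvStepA 0)).sum)).sum
      = (pvPieceValues.map (fun pv => pv.2 * pvC board pv.1)).sum := by
  induction board with
  | nil => simp [pvC]
  | cons line rest ih =>
      have hC : ∀ pv : String × Int,
          pvC (line :: rest) pv.1 = (line.count pv.1 : Int) + pvC rest pv.1 := by
        intro pv; simp [pvC]
      calc ((line :: rest).map (fun l => (l.map (pvStepA 0)).sum)).sum
          = (line.map (pvStepA 0)).sum + (rest.map (fun l => (l.map (pvStepA 0)).sum)).sum := by simp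
        _ = (pvPieceValues.map (fun pv => pv.2 * (line.count pv.1 : Int))).sum
              + (pvPieceValues.map (fun pv => pv.2 * pvC rest pv.1)).sum := by
              rw [pv_line_sum, ih]
        _ = (pvPieceValues.map (fun pv => pv.2 * pvC (line :: rest) pv.1)).sum := by
              conv_rhs => rw [show (pvPieceValues.map (fun pv => pv.2 * pvC (line :: rest) pv.1))
                = pvPieceValues.map (fun pv => pv.2 * ((line.count pv.1 : Int) + pvC rest pv.1)) from
                List.map_congr_left (fun pv _ => by rw [hC pv])]
              exact (pv_weight_add pvPieceValues (fun s => (line.count s : Int))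
                (fun s => pvC rest s)).symm

-- ===== VERDICT (by name: the statement is the Claim_ definition above) =====
theorem heuristic_fucntion_spec : Claim_equal_heuristic_fucntion := by
  intro board _
  unfold Spec_heuristic_fucntion
  rw [pvA_eq_sum, pvB_eq_sum, pv_board_sum]
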